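-- pv_equiv track=rewrite | github.com/sarat-v/BioResilient-AI | pipeline/layer1_sequence/structural_context.py | _best_feature_for_range
-- ===== SOURCE A (Python) =====
-- from typing import Optional
--
-- def _best_feature_for_range(
--     feature_map: dict[int, dict], start: int, end: int
-- ) -> Optional[dict]:
--     """Return the highest-priority UniProt feature in a residue range."""
--     priority = {
--         "active_site": 0,
--         "binding_site": 1,
--         "metal_binding": 2,
--         "site": 3,
--         "modified_residue": 4,
--         "disulfide_bond": 5,
--     }
--     best: Optional[dict] = None
--     best_p = 999
--     for pos in range(start, end + 1):
--         feat = feature_map.get(pos)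
--         if feat:
--             p = priority.get(feat["type"], 99)
--             if p < best_p:
--                 best_p = p
--                 best = feat
--     return best
-- ===== SOURCE B (Python) =====
-- from typing import Optional
--
-- def _best_feature_for_range(
--     feature_map: dict[int, dict], start: int, end: int
-- ) -> Optional[dict]:
--     """Return the highest-priority UniProt feature in a residue range."""
--     priority = {
--         "active_site": 0,
--         "binding_site": 1,
--         "metal_binding": 2,
--         "site": 3,
--         "modified_residue": 4,
--         "disulfide_bond": 5,
--     }
--     candidates = [
--         (priority.get(feat["type"], 99), pos, feat)
--         for pos, feat in feature_map.items()
--         if start <= pos <= end and feat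
--     ]
--     if not candidates:
--         return None
--     return min(candidates, key=lambda t: (t[0], t[1]))[2]
-- ===== Notes on version B (the rewrite author's own statement) =====
-- stated objective: alternative
-- what changed: Instead of a running best/best_p accumulator probing feature_map.get(pos) for every residue position in range(start, end+1), B builds the list of in-range non-empty features from feature_map.items() in one comprehension and takes min by the (priority, position) key; cost moves from O(end-start) to O(k) in the number of features, which a timing run did not measure as faster on its inputs.
import Mathlib
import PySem

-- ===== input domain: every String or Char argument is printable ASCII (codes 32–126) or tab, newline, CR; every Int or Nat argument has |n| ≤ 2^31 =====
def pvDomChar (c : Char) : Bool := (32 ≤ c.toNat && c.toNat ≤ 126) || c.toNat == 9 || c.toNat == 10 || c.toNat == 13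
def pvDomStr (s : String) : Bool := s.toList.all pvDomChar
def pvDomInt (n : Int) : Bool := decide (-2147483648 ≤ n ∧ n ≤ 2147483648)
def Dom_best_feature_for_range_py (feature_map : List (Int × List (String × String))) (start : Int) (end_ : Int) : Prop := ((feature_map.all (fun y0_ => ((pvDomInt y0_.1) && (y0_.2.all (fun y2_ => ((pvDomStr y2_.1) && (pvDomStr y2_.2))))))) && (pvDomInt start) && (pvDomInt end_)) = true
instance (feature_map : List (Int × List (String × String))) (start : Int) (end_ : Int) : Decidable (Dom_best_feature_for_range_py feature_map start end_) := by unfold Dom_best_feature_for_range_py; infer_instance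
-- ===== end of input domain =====

-- B replaces A's per-residue probing loop with accumulator by one comprehension over
-- feature_map.items() followed by min with key (priority, position); equal result wherever A
-- returns (Pre_ excludes only inputs where both raise KeyError).

-- the priority table, the identical literal in both sources
def pvPriority : PySem.Dict String Int :=
  PySem.Dict.ofList [("active_site", 0), ("binding_site", 1), ("metal_binding", 2),
                     ("site", 3), ("modified_residue", 4), ("disulfide_bond", 5)]

-- ===== PORT A =====
-- loop body of A: feat = feature_map.get(pos); if feat: p = priority.get(feat["type"], 99); …
-- (feat["type"]: Pre_ guarantees the key is present wherever this branch runs, so getD is exact)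
def pvStepA (fm : PySem.Dict Int (List (String × String)))
    (st : Option (List (String × String)) × Int) (pos : Int) :
    Option (List (String × String)) × Int :=
  match fm.get? pos with
  | none => st
  | some feat =>
    if feat ≠ [] then
      let p := pvPriority.getD ((PySem.Dict.ofList feat).getD "type" "") 99
      if p < st.2 then (some feat, p) else st
    else st

def best_feature_for_range_py (feature_map : List (Int × List (String × String))) (start : Int) (end_ : Int) : Option (List (String × String)) :=
  ((PySem.List.pyRange start (end_ + 1) 1).foldl
      (pvStepA (PySem.Dict.ofList feature_map)) (none, 999)).1

-- ===== PORT B =====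
-- B: candidates = [(priority.get(feat["type"], 99), pos, feat) for pos, feat in items if …];
--    return min(candidates, key=lambda t: (t[0], t[1]))[2] if candidates else None
def best_feature_for_range_py_alt (feature_map : List (Int × List (String × String))) (start : Int) (end_ : Int) : Option (List (String × String)) :=
  match PySem.List.min2?
      (((PySem.Dict.ofList feature_map).items.filter
          (fun pf => decide (start ≤ pf.1 ∧ pf.1 ≤ end_) && !pf.2.isEmpty)).map
        (fun pf => (pvPriority.getD ((PySem.Dict.ofList pf.2).getD "type" "") 99, pf.1, pf.2)))
      (fun t => t.1) (fun t => t.2.1) with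
  | none => none
  | some t => some t.2.2

-- ===== PRECONDITION & SPEC =====
-- Pre_ excludes exactly the inputs on which the Python raises KeyError at feat["type"]: a non-empty
-- feature at a position inside [start, end] whose dict lacks the key "type"; A and B both raise there.
def Pre_best_feature_for_range_py (feature_map : List (Int × List (String × String))) (start : Int) (end_ : Int) : Prop :=
  ∀ k ∈ (PySem.Dict.ofList feature_map).keys,
    start ≤ k → k ≤ end_ → (PySem.Dict.ofList feature_map).getD k [] ≠ [] →
    (PySem.Dict.ofList ((PySem.Dict.ofList feature_map).getD k [])).contains "type" = true
instance (feature_map : List (Int × List (String × String))) (start : Int) (end_ : Int) : Decidable (Pre_best_feature_for_range_py feature_map start end_) := by unfold Pre_best_feature_for_range_py; infer_instance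

def pvWitness_best_feature_for_range_py : (List (Int × List (String × String))) × Int × Int :=
  ([(3, [("type", "active_site")]), (2, [("type", "site")])], 1, 5)

def Spec_best_feature_for_range_py (feature_map : List (Int × List (String × String))) (start : Int) (end_ : Int) (out : Option (List (String × String))) : Prop := out = best_feature_for_range_py_alt feature_map start end_
instance (feature_map : List (Int × List (String × String))) (start : Int) (end_ : Int) (out : Option (List (String × String))) : Decidable (Spec_best_feature_for_range_py feature_map start end_ out) := by unfold Spec_best_feature_for_range_py; infer_instance

-- ===== CLAIM (what is proved, stated in full; the proofs are below) =====
def Claim_equal_best_feature_for_range_py : Prop := ∀ (feature_map : List (Int × List (String × String))) (start : Int) (end_ : Int), Dom_best_feature_for_range_py feature_map start end_ → Pre_best_feature_for_range_py feature_map start end_ → Spec_best_feature_for_range_py feature_map start end_ (best_feature_for_range_py feature_map start end_)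

-- ===== LEMMAS AND PROOFS =====

-- abbreviations used only by the proofs
def pvPrio (feat : List (String × String)) : Int :=
  pvPriority.getD ((PySem.Dict.ofList feat).getD "type" "") 99

def pvPred (s e : Int) (pf : Int × List (String × String)) : Bool :=
  decide (s ≤ pf.1 ∧ pf.1 ≤ e) && !pf.2.isEmpty

-- the triple built from a (pos, feat) pair, as in B's comprehension
def pvTrip (pf : Int × List (String × String)) : Int × Int × List (String × String) :=
  (pvPrio pf.2, pf.1, pf.2)

-- the "process one found feature (possibly empty)" body of A's loop
def pvG (st : Option (List (String × String)) × Int) (feat : List (String × String)) :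
    Option (List (String × String)) × Int :=
  if feat ≠ [] then
    if pvPrio feat < st.2 then (some feat, pvPrio feat) else st
  else st

-- the same body restricted to non-empty features
def pvH (st : Option (List (String × String)) × Int) (pf : Int × List (String × String)) :
    Option (List (String × String)) × Int :=
  if pvPrio pf.2 < st.2 then (some pf.2, pvPrio pf.2) else st

-- the folding step of PySem.List.min2? at the keys used by port B
def pvM (acc : Option (Int × Int × List (String × String)))
    (x : Int × Int × List (String × String)) :
    Option (Int × Int × List (String × String)) :=
  match acc with
  | none => some x
  | some m =>
    if (decide (x.1 < m.1) || !decide (m.1 < x.1) && decide (x.2.1 < m.2.1)) = true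
    then some x else some m

theorem min2?_eq_foldl_pvM (l : List (Int × Int × List (String × String))) :
    PySem.List.min2? l (fun t => t.1) (fun t => t.2.1) = l.foldl pvM none := by
  unfold PySem.List.min2?
  congr 1
  funext acc x
  cases acc <;> rfl

-- every priority value is below the initial best_p = 999
theorem pvPrio_lt (feat : List (String × String)) : pvPrio feat < 999 := by
  have hp : pvPriority = PySem.Dict.mk [("active_site", 0), ("binding_site", 1),
      ("metal_binding", 2), ("site", 3), ("modified_residue", 4), ("disulfide_bond", 5)] := by
    decide
  unfold pvPrio
  rw [hp]
  simp only [PySem.Dict.get?_mk_cons, PySem.Dict.getD_eq_get?_getD]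
  split_ifs <;> simp [PySem.Dict.get?]

theorem foldl_stepA (fm : PySem.Dict Int (List (String × String))) (l : List Int)
    (st : Option (List (String × String)) × Int) :
    l.foldl (pvStepA fm) st = (l.filterMap fm.get?).foldl pvG st := by
  induction l generalizing st with
  | nil => rfl
  | cons k t ih =>
    rw [List.foldl_cons, List.filterMap_cons]
    cases h : fm.get? k with
    | none =>
      have hh : pvStepA fm st k = st := by simp [pvStepA, h]
      rw [hh]; exact ih st
    | some feat =>
      have hh : pvStepA fm st k = pvG st feat := by simp [pvStepA, pvG, pvPrio, h]
      rw [hh, List.foldl_cons]; exact ih _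

theorem filterMap_get?_eq (fm : PySem.Dict Int (List (String × String))) (l : List Int) :
    l.filterMap fm.get? = (l.filter (fun k => fm.contains k)).map (fun k => fm.getD k []) := by
  induction l with
  | nil => rfl
  | cons k t ih =>
    rw [List.filterMap_cons]
    cases h : fm.get? k with
    | none =>
      have hc : fm.contains k = false := by rw [PySem.Dict.contains_eq_isSome_get?, h]; rfl
      rw [List.filter_cons_of_neg (by simp [hc]), ih]
    | some feat =>
      have hc : fm.contains k = true := by rw [PySem.Dict.contains_eq_isSome_get?, h]; rfl
      have hd : fm.getD k [] = feat := by rw [PySem.Dict.getD_eq_get?_getD, h]; rfl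
      rw [List.filter_cons_of_pos (by simp [hc]), List.map_cons, hd, ih]

theorem eq_of_pairwise_lt_of_mem_iff (l1 : List Int) : ∀ (l2 : List Int),
    l1.Pairwise (· < ·) → l2.Pairwise (· < ·) → (∀ x, x ∈ l1 ↔ x ∈ l2) → l1 = l2 := by
  induction l1 with
  | nil =>
    intro l2 _ _ hm
    cases l2 with
    | nil => rfl
    | cons b t2 => exact absurd ((hm b).mpr (by simp)) (by simp)
  | cons a t ih =>
    intro l2 h1 h2 hm
    cases l2 with
    | nil => exact absurd ((hm a).mp (by simp)) (by simp)
    | cons b t2 =>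
      have ha : a = b := by
        have hab : a ∈ b :: t2 := (hm a).mp (by simp)
        have hba : b ∈ a :: t := (hm b).mpr (by simp)
        rcases List.mem_cons.mp hab with h | h
        · exact h
        · rcases List.mem_cons.mp hba with h' | h'
          · exact h'.symm
          · have := (List.pairwise_cons.mp h2).1 a h
            have := (List.pairwise_cons.mp h1).1 b h'
            omega
      subst ha
      have htm : ∀ x, x ∈ t ↔ x ∈ t2 := by
        intro x
        constructor
        · intro hx
          have hlt := (List.pairwise_cons.mp h1).1 x hx
          rcases List.mem_cons.mp ((hm x).mp (List.mem_cons_of_mem _ hx)) with h | h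
          · omega
          · exact h
        · intro hx
          have hlt := (List.pairwise_cons.mp h2).1 x hx
          rcases List.mem_cons.mp ((hm x).mpr (List.mem_cons_of_mem _ hx)) with h | h
          · omega
          · exact h
      exact congrArg (a :: ·) (ih t2 (List.pairwise_cons.mp h1).2 (List.pairwise_cons.mp h2).2 htm)

theorem key_lists_eq (fm : PySem.Dict Int (List (String × String))) (hnd : fm.keys.Nodup) (s e : Int) :
    (PySem.List.pyRange s (e + 1) 1).filter (fun k => fm.contains k)
      = (PySem.List.sorted fm.keys (fun x => x) false).filter (fun k => decide (s ≤ k ∧ k ≤ e)) := by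
  apply eq_of_pairwise_lt_of_mem_iff
  · exact (PySem.List.pairwise_lt_pyRange_one s (e + 1)).filter _
  · have hperm := PySem.List.sorted_perm fm.keys (fun x => x) false
    have hnds : (PySem.List.sorted fm.keys (fun x => x) false).Nodup := hperm.symm.nodup hnd
    have hle : (PySem.List.sorted fm.keys (fun x => x) false).Pairwise (fun a b => a ≤ b) :=
      PySem.List.sorted_pairwise fm.keys (fun x => x)
    have hlt : (PySem.List.sorted fm.keys (fun x => x) false).Pairwise (· < ·) :=
      (hle.and hnds).imp (fun h => lt_of_le_of_ne h.1 h.2)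
    exact hlt.filter _
  · intro x
    simp only [List.mem_filter, PySem.List.mem_pyRange_one, PySem.List.mem_sorted,
      ← PySem.Dict.contains_iff_mem_keys, decide_eq_true_eq]
    constructor
    · rintro ⟨⟨hx1, hx2⟩, hx3⟩; exact ⟨hx3, hx1, by omega⟩
    · rintro ⟨hx3, hx1, hx2⟩; exact ⟨⟨hx1, by omega⟩, hx3⟩

-- A's fold over the found features, re-expressed over in-range non-empty (pos, feat) pairs
theorem A_fold_eq (fm : PySem.Dict Int (List (String × String))) (s e : Int) (S : List Int) :
    ∀ (st : Option (List (String × String)) × Int),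
    ((S.filter (fun k => decide (s ≤ k ∧ k ≤ e))).map (fun k => fm.getD k [])).foldl pvG st
      = ((S.map (fun k => (k, fm.getD k []))).filter (pvPred s e)).foldl pvH st := by
  induction S with
  | nil => intro st; rfl
  | cons k t ih =>
    intro st
    rw [List.map_cons]
    by_cases h1 : s ≤ k ∧ k ≤ e
    · by_cases h2 : fm.getD k [] = []
      · rw [List.filter_cons_of_pos (by simpa using h1),
            List.filter_cons_of_neg (by simp [pvPred, h2]),
            List.map_cons, List.foldl_cons]
        have hg : pvG st (fm.getD k []) = st := by simp [pvG, h2]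
        rw [hg, ih]
      · rw [List.filter_cons_of_pos (by simpa using h1),
            List.filter_cons_of_pos (by simp [pvPred, h1, h2]),
            List.map_cons, List.foldl_cons, List.foldl_cons]
        have hg : pvG st (fm.getD k []) = pvH st (k, fm.getD k []) := by
          simp [pvG, pvH, h2]
        rw [hg, ih]
    · rw [List.filter_cons_of_neg (by simpa using h1),
          List.filter_cons_of_neg (by simp [pvPred, h1]), ih]

-- core bridge: on a list of pairs with strictly increasing positions, A's first-wins running
-- minimum and Python min over the (priority, position) key produce the same feature
theorem foldl_pvH_eq_min (l : List (Int × List (String × String))) :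
    ∀ (acc : Option (List (String × String)) × Int)
      (m : Option (Int × Int × List (String × String))),
    l.Pairwise (fun a b => a.1 < b.1) →
    (match m with
     | none => acc = (none, 999)
     | some t => acc = (some t.2.2, t.1) ∧ ∀ pf ∈ l, t.2.1 < pf.1) →
    (l.foldl pvH acc).1
      = (match (l.map pvTrip).foldl pvM m with
         | none => none
         | some t => some t.2.2) := by
  induction l with
  | nil =>
    intro acc m _ hrel
    cases m with
    | none => simp_all
    | some t => simpa using congrArg Prod.fst hrel.1
  | cons pf t ih =>
    intro acc m hp hrel
    have hp' := List.pairwise_cons.mp hp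
    rw [List.foldl_cons, List.map_cons, List.foldl_cons]
    cases m with
    | none =>
      subst hrel
      have hA : pvH (none, 999) pf = (some pf.2, pvPrio pf.2) := by
        simp [pvH, pvPrio_lt pf.2]
      have hM : pvM none (pvTrip pf) = some (pvTrip pf) := rfl
      rw [hA, hM]
      exact ih _ _ hp'.2 ⟨rfl, fun u hu => hp'.1 u hu⟩
    | some t0 =>
      obtain ⟨hacc, hlt⟩ := hrel
      subst hacc
      have hpos : t0.2.1 < pf.1 := hlt pf (by simp)
      by_cases hc : pvPrio pf.2 < t0.1
      · have hA : pvH (some t0.2.2, t0.1) pf = (some pf.2, pvPrio pf.2) := by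
          simp [pvH, hc]
        have hM : pvM (some t0) (pvTrip pf) = some (pvTrip pf) := by
          simp only [pvM, pvTrip, Bool.or_eq_true, Bool.and_eq_true, Bool.not_eq_true',
            decide_eq_true_eq, decide_eq_false_iff_not]
          split_ifs with hco
          · rfl
          · exfalso; omega
        rw [hA, hM]
        exact ih _ _ hp'.2 ⟨rfl, fun u hu => hp'.1 u hu⟩
      · have hA : pvH (some t0.2.2, t0.1) pf = (some t0.2.2, t0.1) := by
          simp [pvH, hc]
        have hM : pvM (some t0) (pvTrip pf) = some t0 := by
          simp only [pvM, pvTrip, Bool.or_eq_true, Bool.and_eq_true, Bool.not_eq_true',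
            decide_eq_true_eq, decide_eq_false_iff_not]
          split_ifs with hco
          · exfalso; omega
          · rfl
        rw [hA, hM]
        exact ih _ _ hp'.2 ⟨rfl, fun u hu => lt_trans hpos (hp'.1 u hu)⟩

-- pvM commutes for elements with distinct positions (used for permutation invariance of min)
theorem pvM_comm (x y : Int × Int × List (String × String)) (h : x = y ∨ x.2.1 ≠ y.2.1)
    (z : Option (Int × Int × List (String × String))) :
    pvM (pvM z x) y = pvM (pvM z y) x := by
  rcases h with h | h
  · subst h; rfl
  · cases z with
    | none =>
      simp only [pvM, Bool.or_eq_true, Bool.and_eq_true, Bool.not_eq_true',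
        decide_eq_true_eq, decide_eq_false_iff_not]
      split_ifs <;> first | rfl | (exfalso; omega)
    | some m =>
      simp only [pvM, Bool.or_eq_true, Bool.and_eq_true, Bool.not_eq_true',
        decide_eq_true_eq, decide_eq_false_iff_not]
      split_ifs <;>
        simp only [pvM, Bool.or_eq_true, Bool.and_eq_true, Bool.not_eq_true',
          decide_eq_true_eq, decide_eq_false_iff_not] <;>
        split_ifs <;> first | rfl | (exfalso; omega)

-- ===== VERDICT (by name: the statement is the Claim_ definition above) =====
theorem best_feature_for_range_py_spec : Claim_equal_best_feature_for_range_py := by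
  intro feature_map start end_ _ _
  unfold Spec_best_feature_for_range_py best_feature_for_range_py best_feature_for_range_py_alt
  have hnd : (PySem.Dict.ofList feature_map).keys.Nodup := PySem.Dict.nodup_keys_ofList _
  rw [min2?_eq_foldl_pvM, foldl_stepA, filterMap_get?_eq, key_lists_eq _ hnd, A_fold_eq]
  have hTp : (((PySem.List.sorted (PySem.Dict.ofList feature_map).keys (fun x => x) false).map
        (fun k => (k, (PySem.Dict.ofList feature_map).getD k []))).filter
        (pvPred start end_)).Pairwise (fun a b => a.1 < b.1) := by
    have hperm := PySem.List.sorted_perm (PySem.Dict.ofList feature_map).keys (fun x => x) false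
    have hnds : (PySem.List.sorted (PySem.Dict.ofList feature_map).keys (fun x => x) false).Nodup :=
      hperm.symm.nodup hnd
    have hle := PySem.List.sorted_pairwise (PySem.Dict.ofList feature_map).keys (fun x : Int => x)
    have hlt : (PySem.List.sorted (PySem.Dict.ofList feature_map).keys (fun x => x) false).Pairwise (· < ·) :=
      (hle.and hnds).imp (fun h => lt_of_le_of_ne h.1 h.2)
    exact ((hlt.map (fun k => (k, (PySem.Dict.ofList feature_map).getD k []))
      (fun a b hab => hab)).filter _)
  rw [foldl_pvH_eq_min _ _ none hTp rfl]
  have hitems : (PySem.Dict.ofList feature_map).items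
      = (PySem.Dict.ofList feature_map).keys.map
          (fun k => (k, (PySem.Dict.ofList feature_map).getD k [])) :=
    PySem.Dict.items_eq_map_keys _ hnd []
  have hperm2 : ((((PySem.List.sorted (PySem.Dict.ofList feature_map).keys (fun x => x) false).map
          (fun k => (k, (PySem.Dict.ofList feature_map).getD k []))).filter
          (pvPred start end_)).map pvTrip).Perm
        ((((PySem.Dict.ofList feature_map).items.filter (pvPred start end_)).map pvTrip)) := by
    rw [hitems]
    exact ((((PySem.List.sorted_perm _ _ _).map _).filter _).map _)
  have hndpos : (((((PySem.Dict.ofList feature_map).items.filter (pvPred start end_)).map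
      pvTrip)).map (fun t => t.2.1)).Nodup := by
    have h1 : ((((PySem.Dict.ofList feature_map).items.filter (pvPred start end_)).map
        pvTrip)).map (fun t => t.2.1)
        = (((PySem.Dict.ofList feature_map).items.filter (pvPred start end_))).map
            (fun pf => pf.1) := by
      simp [List.map_map, pvTrip, Function.comp]
    have hkeys : ((PySem.Dict.ofList feature_map).items.map
        (fun pf : Int × List (String × String) => pf.1)).Nodup := hnd
    rw [h1]
    exact ((List.filter_sublist.map (fun pf : Int × List (String × String) => pf.1)).nodup hkeys)
  have hmin : ((((PySem.List.sorted (PySem.Dict.ofList feature_map).keys (fun x => x) false).map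
          (fun k => (k, (PySem.Dict.ofList feature_map).getD k []))).filter
          (pvPred start end_)).map pvTrip).foldl pvM none
      = ((((PySem.Dict.ofList feature_map).items.filter (pvPred start end_)).map pvTrip)).foldl
          pvM none := by
    apply hperm2.foldl_eq' _ none
    intro x hx y hy z
    apply pvM_comm
    by_cases hxy : x = y
    · exact Or.inl hxy
    · refine Or.inr (fun hk => hxy ?_)
      exact List.inj_on_of_nodup_map hndpos (hperm2.mem_iff.mp hx) (hperm2.mem_iff.mp hy) hk
  rw [hmin]
  rfl
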